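-- pv_equiv track=rewrite | github.com/MahithaaSK/OMR-Evaluation-App | src/scorer.py | map_bubbles_to_answers
-- ===== SOURCE A (Python) =====
-- def map_bubbles_to_answers(detected_bubbles, subjects_order, questions_per_subject=100):
--     """
--     Map the detected bubble states to answer letters for each subject and question.
--     """
--     option_map = {0:'A', 1:'B', 2:'C', 3:'D'}
--     mapped = {}
--     idx = 0
--
--     for s in subjects_order:
--         # Use subject names exactly as they are from Excel
--         mapped[s] = {}
--         for q in range(1, questions_per_subject+1):
--             group = detected_bubbles[idx:idx+4]
--             idx += 4
--
--             filled_count = group.count('filled')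
--             if filled_count == 1:  # Exactly one bubble filled
--                 mapped[s][q] = option_map[group.index('filled')]
--             elif filled_count > 1:  # Multiple bubbles filled
--                 mapped[s][q] = 'AMBIGUOUS'
--             else:  # No bubbles filled
--                 mapped[s][q] = 'BLANK'
--
--     return mapped
-- ===== SOURCE B (Python) =====
-- def map_bubbles_to_answers(detected_bubbles, subjects_order, questions_per_subject=100):
--     """
--     Map the detected bubble states to answer letters for each subject and question.
--     Single streaming pass: a small state machine walks the bubble list once,
--     tracking (position in group, filled count, letter of first filled bubble) and
--     emitting one classification per completed 4-bubble group; missing groups are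
--     padded BLANK, and the stream of classifications is then dealt out to the
--     subject/question dictionary with an iterator.
--     """
--     letters = 'ABCD'
--     needed = len(subjects_order) * max(questions_per_subject, 0)
--     answers = []
--     pos = 0
--     count = 0
--     letter = None
--     for state in detected_bubbles:
--         if len(answers) == needed:
--             break
--         if state == 'filled':
--             if count == 0:
--                 letter = letters[pos]
--             count += 1
--         pos += 1
--         if pos == 4:
--             answers.append(letter if count == 1 else ('AMBIGUOUS' if count > 1 else 'BLANK'))
--             pos = 0
--             count = 0
--             letter = None
--     if pos > 0 and len(answers) < needed:
--         answers.append(letter if count == 1 else ('AMBIGUOUS' if count > 1 else 'BLANK'))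
--     while len(answers) < needed:
--         answers.append('BLANK')
--     it = iter(answers)
--     return {s: {q + 1: next(it) for q in range(questions_per_subject)}
--             for s in subjects_order}
-- ===== Notes on version B (the rewrite author's own statement) =====
-- stated objective: alternative
-- what changed: A repeatedly slices 4-bubble groups and classifies each with count()/index() inside a nested subject/question loop driven by a running index; B instead makes one streaming pass over the bubble list with a state machine (position in group, filled count, letter of first filled bubble) that emits one classification per completed group, pads missing groups BLANK, and finally deals the classification stream out to the subject/question dict with an iterator.
import Mathlib
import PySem

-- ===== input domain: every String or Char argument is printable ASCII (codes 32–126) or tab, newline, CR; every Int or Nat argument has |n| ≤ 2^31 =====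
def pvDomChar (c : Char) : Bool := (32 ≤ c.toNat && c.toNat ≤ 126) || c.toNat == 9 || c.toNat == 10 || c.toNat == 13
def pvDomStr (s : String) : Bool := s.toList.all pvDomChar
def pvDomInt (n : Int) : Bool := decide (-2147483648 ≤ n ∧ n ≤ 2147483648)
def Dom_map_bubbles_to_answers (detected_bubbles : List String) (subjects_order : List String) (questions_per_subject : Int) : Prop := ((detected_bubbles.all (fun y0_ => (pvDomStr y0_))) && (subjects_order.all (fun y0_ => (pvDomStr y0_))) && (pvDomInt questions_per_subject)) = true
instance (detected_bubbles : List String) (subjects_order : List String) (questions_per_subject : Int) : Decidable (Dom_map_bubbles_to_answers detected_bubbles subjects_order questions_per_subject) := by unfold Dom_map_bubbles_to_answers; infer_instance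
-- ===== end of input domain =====

-- B replaces A's nested slice-count-index loops by a single streaming state machine over the
-- bubble list (emit one classification per completed 4-group, pad BLANK, deal to subjects);
-- alternative decomposition, same cost.


-- ===== PORT A =====
def map_bubbles_to_answers (detected_bubbles : List String) (subjects_order : List String) (questions_per_subject : Int) : List (String × List (Int × String)) :=
  let optionMap : PySem.Dict Int String := PySem.Dict.ofList [(0, "A"), (1, "B"), (2, "C"), (3, "D")]
  let st :=
    subjects_order.foldl
      (fun (st : PySem.Dict String (PySem.Dict Int String) × Int) s =>
        -- mapped[s] = {}
        let st := (st.1.insert s PySem.Dict.empty, st.2)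
        (PySem.List.pyRange 1 (questions_per_subject + 1) 1).foldl
          (fun (st : PySem.Dict String (PySem.Dict Int String) × Int) q =>
            let group := PySem.List.slice detected_bubbles (some st.2) (some (st.2 + 4))
            let idx := st.2 + 4
            let filledCount := group.count "filled"
            let v : String :=
              if filledCount == 1 then
                -- option_map[group.index('filled')]: the index is always 0..3 here, so getD is exact
                optionMap.getD ((PySem.List.index? group "filled").getD 0) ""
              else if filledCount > 1 then "AMBIGUOUS"
              else "BLANK"
            (st.1.insert s ((st.1.getD s PySem.Dict.empty).insert q v), idx))
          st)
      (PySem.Dict.empty, 0)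
  st.1.items.map (fun p => (p.1, p.2.items))

-- ===== PORT B =====
-- Source B's emit expression `letter if count == 1 else (...)`; when count == 1 the letter was
-- always set, so getD "" is exact there
def pvEmit (count : Int) (letter : Option String) : String :=
  if count == 1 then letter.getD ""
  else if count > 1 then "AMBIGUOUS"
  else "BLANK"

-- one iteration of Source B's for-loop; the leading guard is the `break` once
-- len(answers) == needed (after it fires the state never changes again, as after a break)
def pvStreamStep (needed : Int) (st : List String × Int × Int × Option String) (state : String) :
    List String × Int × Int × Option String :=
  if ((st.1.length : Int) == needed) then st
  else
    let cl : Int × Option String :=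
      if state == "filled" then
        (st.2.2.1 + 1,
          -- letters[pos]: pos is always 0..3 here, so the lookup succeeds
          if st.2.2.1 == 0 then (PySem.Str.pyGet? "ABCD" st.2.1).map (fun c => String.singleton c)
          else st.2.2.2)
      else (st.2.2.1, st.2.2.2)
    let pos := st.2.1 + 1
    if pos == 4 then (st.1 ++ [pvEmit cl.1 cl.2], 0, 0, none)
    else (st.1, pos, cl.1, cl.2)

-- Source B's `while len(answers) < needed: answers.append('BLANK')` (fuel = the missing count)
def pvPad : List String → Nat → List String
  | ans, 0 => ans
  | ans, k + 1 => pvPad (ans ++ ["BLANK"]) k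

-- Source B's final dict comprehension: `next(it)` deals the classifications out in order, so each
-- subject reads positions 0..questions_per_subject-1 of the remaining stream and drops them
def pvDeal (qps : Int) : List String → List String →
    PySem.Dict String (PySem.Dict Int String) → PySem.Dict String (PySem.Dict Int String)
  | [], _, m => m
  | s :: t, ans, m =>
      pvDeal qps t (ans.drop qps.toNat)
        (m.insert s (PySem.Dict.ofList
          ((PySem.List.pyRange 0 qps 1).map (fun q => (q + 1, PySem.List.pyGetD ans q "")))))

def map_bubbles_to_answers_alt (detected_bubbles : List String) (subjects_order : List String) (questions_per_subject : Int) : List (String × List (Int × String)) :=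
  let needed : Int := (subjects_order.length : Int) * max questions_per_subject 0
  let st := detected_bubbles.foldl (pvStreamStep needed) ([], 0, 0, none)
  let ans := if 0 < st.2.1 ∧ (st.1.length : Int) < needed
             then st.1 ++ [pvEmit st.2.2.1 st.2.2.2] else st.1
  let ans := pvPad ans (needed - (ans.length : Int)).toNat
  (pvDeal questions_per_subject subjects_order ans PySem.Dict.empty).items.map
    (fun p => (p.1, p.2.items))

-- ===== PRECONDITION & SPEC =====
def Spec_map_bubbles_to_answers (detected_bubbles : List String) (subjects_order : List String) (questions_per_subject : Int) (out : List (String × List (Int × String))) : Prop := out = map_bubbles_to_answers_alt detected_bubbles subjects_order questions_per_subject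
instance (detected_bubbles : List String) (subjects_order : List String) (questions_per_subject : Int) (out : List (String × List (Int × String))) : Decidable (Spec_map_bubbles_to_answers detected_bubbles subjects_order questions_per_subject out) := by unfold Spec_map_bubbles_to_answers; infer_instance

-- ===== CLAIM (what is proved, stated in full; the proofs are below) =====
def Claim_equal_map_bubbles_to_answers : Prop := ∀ (detected_bubbles : List String) (subjects_order : List String) (questions_per_subject : Int), Dom_map_bubbles_to_answers detected_bubbles subjects_order questions_per_subject → Spec_map_bubbles_to_answers detected_bubbles subjects_order questions_per_subject (map_bubbles_to_answers detected_bubbles subjects_order questions_per_subject)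

-- ===== LEMMAS AND PROOFS =====

-- the option_map literal A builds
def pvOM : PySem.Dict Int String := PySem.Dict.ofList [(0, "A"), (1, "B"), (2, "C"), (3, "D")]

-- A's classification of one bubble group
def pvClassify (group : List String) : String :=
  let filledCount := group.count "filled"
  if filledCount == 1 then
    pvOM.getD ((PySem.List.index? group "filled").getD 0) ""
  else if filledCount > 1 then "AMBIGUOUS"
  else "BLANK"

-- classification of group number j of db
def pvCls (db : List String) (j : Nat) : String := pvClassify ((db.drop (4 * j)).take 4)

-- the per-subject dict both ports construct: keys 1..Q over groups g, g+1, …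
def pvInner (db : List String) (Q g : Nat) : PySem.Dict Int String :=
  (List.range Q).foldl
    (fun d (k : Nat) => d.insert (1 + (k : Int)) (pvCls db (g + k)))
    PySem.Dict.empty

-- canonical nested construction both ports reach (g = index of the subject's first group)
def pvBuild (db : List String) (Q : Nat) :
    List String → Nat → PySem.Dict String (PySem.Dict Int String) →
      PySem.Dict String (PySem.Dict Int String)
  | [], _, m => m
  | s :: t, g, m => pvBuild db Q t (g + Q) (m.insert s (pvInner db Q g))

-- A's inner-loop body, with its state (mapped, idx)
def pvStepA (db : List String) (s : String)
    (st : PySem.Dict String (PySem.Dict Int String) × Int) (q : Int) :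
    PySem.Dict String (PySem.Dict Int String) × Int :=
  (st.1.insert s ((st.1.getD s PySem.Dict.empty).insert q
      (pvClassify (PySem.List.slice db (some st.2) (some (st.2 + 4))))), st.2 + 4)

lemma pv_innerA (db : List String) (s : String) (Q g : Nat)
    (m : PySem.Dict String (PySem.Dict Int String)) :
    (List.range Q).foldl (fun st (k : Nat) => pvStepA db s st (1 + (k : Int)))
        (m.insert s PySem.Dict.empty, ((4 * g : Nat) : Int))
      = (m.insert s (pvInner db Q g), ((4 * (g + Q) : Nat) : Int)) := by
  induction Q with
  | zero => simp [pvInner]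
  | succ Q ih =>
      rw [List.range_succ, List.foldl_append, ih]
      simp only [List.foldl_cons, List.foldl_nil, pvStepA,
        PySem.Dict.getD_insert_self, PySem.Dict.insert_insert_self]
      refine Prod.ext ?_ ?_
      · simp only [pvInner, List.range_succ, List.foldl_append, List.foldl_cons, List.foldl_nil]
        congr 2
        show pvClassify _ = pvCls db (g + Q)
        have h4 : ((4 * (g + Q) : Nat) : Int) + 4 = ((4 * (g + Q) : Nat) : Int) + ((4 : Nat) : Int) := by
          push_cast; ring
        rw [pvCls, h4, PySem.List.slice_natCast_add]
      · push_cast; ring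

lemma pv_outerA (db : List String) (Q : Nat) (l : List String) :
    ∀ (g : Nat) (m : PySem.Dict String (PySem.Dict Int String)),
    l.foldl (fun st s =>
        (List.range Q).foldl (fun st (k : Nat) => pvStepA db s st (1 + (k : Int)))
          (st.1.insert s PySem.Dict.empty, st.2)) (m, ((4 * g : Nat) : Int))
      = (pvBuild db Q l g m, ((4 * (g + l.length * Q) : Nat) : Int)) := by
  induction l with
  | nil => intro g m; simp [pvBuild]
  | cons s t ih =>
      intro g m
      rw [List.foldl_cons]
      dsimp only
      rw [pv_innerA, ih (g + Q)]
      simp only [pvBuild, List.length_cons]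
      congr 2
      ring

-- ---- B side: the streaming pass produces exactly the group classifications ----

lemma pvPad_eq (k : Nat) : ∀ (ans : List String), pvPad ans k = ans ++ List.replicate k "BLANK" := by
  induction k with
  | zero => intro ans; simp [pvPad]
  | succ k ih => intro ans; rw [pvPad, ih]; simp [List.replicate_succ]

-- once len(answers) == needed the stream state never changes (the `break`)
lemma pv_fold_stop (n : Int) : ∀ (db : List String) (st : List String × Int × Int × Option String),
    ((st.1.length : Int) == n) = true → db.foldl (pvStreamStep n) st = st := by
  intro db
  induction db with
  | nil => intro st _; rfl
  | cons a t ih => intro st h; rw [List.foldl_cons, pvStreamStep, if_pos h]; exact ih st h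

-- four stream steps consume one whole group and emit its classification
lemma pv_step4 (n : Int) (ans : List String) (h : ((ans.length : Int) == n) = false)
    (a b c d : String) :
    [a, b, c, d].foldl (pvStreamStep n) (ans, 0, 0, none)
      = (ans ++ [pvClassify [a, b, c, d]], 0, 0, none) := by
  by_cases ha : a = "filled" <;> by_cases hb : b = "filled" <;>
    by_cases hc : c = "filled" <;> by_cases hd : d = "filled" <;>
      simp [pvStreamStep, pvEmit, pvClassify, pvOM, h, ha, hb, hc, hd,
        PySem.List.index?, List.idxOf?, List.findIdx?_cons, PySem.Str.pyGet?, beq_iff_eq] <;> decide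

-- leftover partial group: the flush line emits its classification
lemma pv_flush1 (n : Int) (ans : List String) (h : ((ans.length : Int) == n) = false)
    (a : String) :
    (([a] : List String).foldl (pvStreamStep n) (ans, 0, 0, none)).1 = ans ∧
    (let st := ([a] : List String).foldl (pvStreamStep n) (ans, 0, 0, none)
     0 < st.2.1 ∧ pvEmit st.2.2.1 st.2.2.2 = pvClassify [a]) := by
  by_cases ha : a = "filled" <;>
    simp [pvStreamStep, pvEmit, pvClassify, pvOM, h, ha,
      PySem.List.index?, List.idxOf?, List.findIdx?_cons, PySem.Str.pyGet?, beq_iff_eq] <;> decide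

lemma pv_flush2 (n : Int) (ans : List String) (h : ((ans.length : Int) == n) = false)
    (a b : String) :
    (([a, b] : List String).foldl (pvStreamStep n) (ans, 0, 0, none)).1 = ans ∧
    (let st := ([a, b] : List String).foldl (pvStreamStep n) (ans, 0, 0, none)
     0 < st.2.1 ∧ pvEmit st.2.2.1 st.2.2.2 = pvClassify [a, b]) := by
  by_cases ha : a = "filled" <;> by_cases hb : b = "filled" <;>
    simp [pvStreamStep, pvEmit, pvClassify, pvOM, h, ha, hb,
      PySem.List.index?, List.idxOf?, List.findIdx?_cons, PySem.Str.pyGet?, beq_iff_eq] <;> decide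

lemma pv_flush3 (n : Int) (ans : List String) (h : ((ans.length : Int) == n) = false)
    (a b c : String) :
    (([a, b, c] : List String).foldl (pvStreamStep n) (ans, 0, 0, none)).1 = ans ∧
    (let st := ([a, b, c] : List String).foldl (pvStreamStep n) (ans, 0, 0, none)
     0 < st.2.1 ∧ pvEmit st.2.2.1 st.2.2.2 = pvClassify [a, b, c]) := by
  by_cases ha : a = "filled" <;> by_cases hb : b = "filled" <;> by_cases hc : c = "filled" <;>
    simp [pvStreamStep, pvEmit, pvClassify, pvOM, h, ha, hb, hc,
      PySem.List.index?, List.idxOf?, List.findIdx?_cons, PySem.Str.pyGet?, beq_iff_eq] <;> decide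

-- group j+1 of a list starting with a full group is group j of the rest
lemma pvCls_shift (a b c d : String) (rest : List String) (i : Nat) :
    pvCls (a :: b :: c :: d :: rest) (i + 1) = pvCls rest i := by
  have h4 : 4 * (i + 1) = (((4 * i + 1) + 1) + 1) + 1 := by ring
  simp [pvCls, h4, List.drop_succ_cons]

-- past the end of a short list every group classifies BLANK
lemma pv_blank_tail (db : List String) (hle : db.length ≤ 4) (m : Nat) :
    (List.range m).map (fun i => pvCls db (i + 1)) = List.replicate m "BLANK" := by
  rw [List.eq_replicate_iff]
  constructor
  · simp
  · intro x hx
    obtain ⟨i, _, rfl⟩ := List.mem_map.mp hx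
    have : db.drop (4 * (i + 1)) = [] := List.drop_eq_nil_of_le (by omega)
    simp [pvCls, this, pvClassify]

lemma pvCls_zero_short (db : List String) (hle : db.length ≤ 4) :
    pvCls db 0 = pvClassify db := by
  simp [pvCls, List.take_of_length_le hle]

-- B's flush + pad phase on the final stream state
def pvFinish (n : Int) (st : List String × Int × Int × Option String) : List String :=
  if 0 < st.2.1 ∧ (st.1.length : Int) < n
  then pvPad (st.1 ++ [pvEmit st.2.2.1 st.2.2.2])
         (n - (((st.1 ++ [pvEmit st.2.2.1 st.2.2.2]).length : Nat) : Int)).toNat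
  else pvPad st.1 (n - (st.1.length : Int)).toNat

-- B's whole answer pipeline, with an accumulator (matches the lets of the alt port)
def pvRun (db : List String) (n : Int) (ans0 : List String) : List String :=
  pvFinish n (db.foldl (pvStreamStep n) (ans0, 0, 0, none))

lemma pvRun_spec (n : Nat) : ∀ (m : Nat) (db ans : List String), ans.length + m = n →
    pvRun db (n : Int) ans = ans ++ (List.range m).map (pvCls db) := by
  intro m
  induction m with
  | zero =>
      intro db ans h
      have hb : (((ans, (0 : Int), (0 : Int), (none : Option String)).1.length : Int) == (n : Int)) = true := by
        simp [← h]
      unfold pvRun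
      rw [pv_fold_stop (n : Int) db _ hb]
      have h0 : ((n : Int) - ((ans.length : Nat) : Int)).toNat = 0 := by omega
      simp [pvFinish, h0, pvPad]
  | succ m ih =>
      intro db ans h
      have hlt : ans.length < n := by omega
      have hne : (((ans : List String).length : Int) == (n : Int)) = false := by
        simp; omega
      match db with
      | [] =>
          unfold pvRun pvFinish
          simp only [List.foldl_nil]
          rw [if_neg (by simp)]
          have hk : ((n : Int) - (ans.length : Int)).toNat = m + 1 := by omega
          rw [hk, pvPad_eq]
          rw [List.range_succ_eq_map, List.map_cons, List.map_map]
          rw [show ((List.range m).map (pvCls [] ∘ Nat.succ)) = (List.range m).map (fun i => pvCls ([] : List String) (i + 1)) from rfl]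
          rw [pv_blank_tail _ (by simp), pvCls_zero_short _ (by simp)]
          simp [pvClassify, List.replicate_succ]
      | [a] =>
          obtain ⟨h1, h2, h3⟩ := pv_flush1 (n : Int) ans hne a
          unfold pvRun pvFinish
          have hc : (((([a] : List String).foldl (pvStreamStep (n : Int)) (ans, 0, 0, none)).1.length : Int) < (n : Int)) := by
            rw [h1]; exact_mod_cast hlt
          rw [if_pos ⟨h2, hc⟩, h1, h3]
          have hk : ((n : Int) - ((ans ++ [pvClassify [a]]).length : Int)).toNat = m := by
            simp; omega
          rw [hk, pvPad_eq]
          rw [List.range_succ_eq_map, List.map_cons, List.map_map]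
          rw [show ((List.range m).map (pvCls [a] ∘ Nat.succ)) = (List.range m).map (fun i => pvCls ([a] : List String) (i + 1)) from rfl]
          rw [pv_blank_tail _ (by simp), pvCls_zero_short _ (by simp)]
          simp
      | [a, b] =>
          obtain ⟨h1, h2, h3⟩ := pv_flush2 (n : Int) ans hne a b
          unfold pvRun pvFinish
          have hc : (((([a, b] : List String).foldl (pvStreamStep (n : Int)) (ans, 0, 0, none)).1.length : Int) < (n : Int)) := by
            rw [h1]; exact_mod_cast hlt
          rw [if_pos ⟨h2, hc⟩, h1, h3]
          have hk : ((n : Int) - ((ans ++ [pvClassify [a, b]]).length : Int)).toNat = m := by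
            simp; omega
          rw [hk, pvPad_eq]
          rw [List.range_succ_eq_map, List.map_cons, List.map_map]
          rw [show ((List.range m).map (pvCls [a, b] ∘ Nat.succ)) = (List.range m).map (fun i => pvCls ([a, b] : List String) (i + 1)) from rfl]
          rw [pv_blank_tail _ (by simp), pvCls_zero_short _ (by simp)]
          simp
      | [a, b, c] =>
          obtain ⟨h1, h2, h3⟩ := pv_flush3 (n : Int) ans hne a b c
          unfold pvRun pvFinish
          have hc : (((([a, b, c] : List String).foldl (pvStreamStep (n : Int)) (ans, 0, 0, none)).1.length : Int) < (n : Int)) := by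
            rw [h1]; exact_mod_cast hlt
          rw [if_pos ⟨h2, hc⟩, h1, h3]
          have hk : ((n : Int) - ((ans ++ [pvClassify [a, b, c]]).length : Int)).toNat = m := by
            simp; omega
          rw [hk, pvPad_eq]
          rw [List.range_succ_eq_map, List.map_cons, List.map_map]
          rw [show ((List.range m).map (pvCls [a, b, c] ∘ Nat.succ)) = (List.range m).map (fun i => pvCls ([a, b, c] : List String) (i + 1)) from rfl]
          rw [pv_blank_tail _ (by simp), pvCls_zero_short _ (by simp)]
          simp
      | a :: b :: c :: d :: rest =>
          have hstep : (a :: b :: c :: d :: rest).foldl (pvStreamStep (n : Int)) (ans, 0, 0, none)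
              = rest.foldl (pvStreamStep (n : Int)) (ans ++ [pvClassify [a, b, c, d]], 0, 0, none) := by
            have := pv_step4 (n : Int) ans hne a b c d
            simp only [List.foldl_cons, List.foldl_nil] at this ⊢
            rw [this]
          have hrun : pvRun (a :: b :: c :: d :: rest) (n : Int) ans
              = pvRun rest (n : Int) (ans ++ [pvClassify [a, b, c, d]]) := by
            unfold pvRun; rw [hstep]
          rw [hrun, ih rest _ (by simp; omega)]
          have h1 : pvClassify [a, b, c, d] = pvCls (a :: b :: c :: d :: rest) 0 := by
            simp [pvCls]
          have h2 : (List.range m).map (pvCls rest)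
              = (List.range m).map (pvCls (a :: b :: c :: d :: rest) ∘ Nat.succ) := by
            apply List.map_congr_left
            intro i _
            show pvCls rest i = pvCls (a :: b :: c :: d :: rest) (i + 1)
            rw [pvCls_shift]
          rw [h1, h2, List.range_succ_eq_map, List.map_cons, List.map_map, List.append_assoc]
          rfl

-- the inner dict of one subject: the pyRange/pyGetD comprehension equals pvInner
lemma pv_inner_ofList (db : List String) (qps : Int) (g : Nat) (ans : List String)
    (hans : ∀ k : Nat, k < qps.toNat → ans.getD k "" = pvCls db (g + k)) :
    PySem.Dict.ofList
        ((PySem.List.pyRange 0 qps 1).map (fun q => (q + 1, PySem.List.pyGetD ans q "")))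
      = pvInner db qps.toNat g := by
  by_cases hle : qps ≤ 0
  · have h0 : qps.toNat = 0 := by omega
    rw [PySem.List.pyRange_one_eq_nil hle]
    simp [h0, pvInner, PySem.Dict.ofList, PySem.Dict.update]
  · obtain ⟨Q, hQ⟩ : ∃ Q : Nat, qps = (Q : Int) := ⟨qps.toNat, by omega⟩
    subst hQ
    rw [PySem.List.pyRange_zero_natCast Q]
    simp only [PySem.Dict.ofList, PySem.Dict.update, List.map_map, List.foldl_map,
      Int.toNat_natCast]
    unfold pvInner
    apply PySem.List.foldl_congr_mem
    intro acc k hk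
    have hk' : k < Q := List.mem_range.mp hk
    simp only [Function.comp]
    rw [PySem.List.pyGetD_natCast, hans k (by omega),
      show ((k : Nat) : Int) + 1 = 1 + (k : Nat) from by ring]

-- dealing the flat classification stream out to the subjects builds pvBuild
lemma pv_deal (db : List String) (qps : Int) : ∀ (l : List String),
    ∀ (g : Nat) (m : PySem.Dict String (PySem.Dict Int String)),
    pvDeal qps l ((List.range (l.length * qps.toNat)).map (fun k => pvCls db (g + k))) m
      = pvBuild db qps.toNat l g m := by
  intro l
  induction l with
  | nil => intro g m; simp [pvDeal, pvBuild]
  | cons s t ih =>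
      intro g m
      have hsplit : (s :: t).length * qps.toNat = qps.toNat + t.length * qps.toNat := by
        simp [List.length_cons]; ring
      rw [hsplit, List.range_add, List.map_append, List.map_map]
      simp only [pvDeal, pvBuild]
      have hlen : ((List.range qps.toNat).map (fun k => pvCls db (g + k))).length = qps.toNat := by
        simp
      have hdrop : (((List.range qps.toNat).map (fun k => pvCls db (g + k)))
            ++ (List.range (t.length * qps.toNat)).map
                ((fun k => pvCls db (g + k)) ∘ (qps.toNat + ·))).drop qps.toNat
          = (List.range (t.length * qps.toNat)).map (fun k => pvCls db ((g + qps.toNat) + k)) := by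
        rw [List.drop_left' hlen, List.map_congr_left]
        intro k _
        simp only [Function.comp]
        congr 1
        omega
      rw [hdrop]
      rw [pv_inner_ofList db qps g _ ?hans]
      · exact ih (g + qps.toNat) _
      case hans =>
        intro k hk
        rw [List.getD_append _ _ _ _ (by simp [hk])]
        simp [List.getD, hk]

-- ===== VERDICT (by name: the statement is the Claim_ definition above) =====
theorem map_bubbles_to_answers_spec : Claim_equal_map_bubbles_to_answers := by
  intro db subj qps _hdom
  unfold Spec_map_bubbles_to_answers
  -- A's value as a pvBuild
  have hpr : (fun (st : PySem.Dict String (PySem.Dict Int String) × Int) (s : String) =>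
        (PySem.List.pyRange 1 (qps + 1) 1).foldl (fun st q => pvStepA db s st q)
          (st.1.insert s PySem.Dict.empty, st.2))
      = (fun st s =>
        (List.range qps.toNat).foldl (fun st (k : Nat) => pvStepA db s st (1 + (k : Int)))
          (st.1.insert s PySem.Dict.empty, st.2)) := by
    funext st s
    rw [PySem.List.pyRange_one, List.foldl_map]
    norm_num
  have hA : map_bubbles_to_answers db subj qps
      = ((subj.foldl (fun st s =>
            (PySem.List.pyRange 1 (qps + 1) 1).foldl (fun st q => pvStepA db s st q)
              (st.1.insert s PySem.Dict.empty, st.2)) (PySem.Dict.empty, 0)).1.items.map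
          (fun p => (p.1, p.2.items))) := rfl
  have hOA := pv_outerA db qps.toNat subj 0 PySem.Dict.empty
  rw [hpr] at hA
  simp only [Nat.mul_zero, Nat.cast_zero, Nat.zero_add] at hOA
  rw [hOA] at hA
  -- B's value as a pvBuild
  have hneed : (subj.length : Int) * max qps 0 = ((subj.length * qps.toNat : Nat) : Int) := by
    have : max qps 0 = ((qps.toNat : Nat) : Int) := by omega
    rw [this]; push_cast; ring
  have hB : map_bubbles_to_answers_alt db subj qps
      = ((pvDeal qps subj (pvRun db ((subj.length : Int) * max qps 0) []) PySem.Dict.empty).items.map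
          (fun p => (p.1, p.2.items))) := by
    unfold map_bubbles_to_answers_alt pvRun pvFinish
    dsimp only
    split <;> rfl
  rw [hB, hneed, pvRun_spec (subj.length * qps.toNat) (subj.length * qps.toNat) db [] (by simp)]
  have hcls : (List.range (subj.length * qps.toNat)).map (pvCls db)
      = (List.range (subj.length * qps.toNat)).map (fun k => pvCls db (0 + k)) := by
    simp
  rw [List.nil_append, hcls, pv_deal db qps subj 0 PySem.Dict.empty, hA]
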